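-- pv_equiv track=rewrite | github.com/spacetelescope/stdatamodels | src/stdatamodels/jwst/_kwtool/cli.py | _loop_check_keyword_exist
-- ===== SOURCE A (Python) =====
-- def _check_keyword_exist(the_set, the_tuple):
--     exist = "No"
--     if the_set:
--         for tpl in the_set:
--             if tpl[1] == the_tuple[1]:
--                 exist = "Yes"
--     return exist
--
-- def _loop_check_keyword_exist(set1, set2, set3, set4):
--     removed_tuples = []
--     for tpl in set1:
--         existin2 = _check_keyword_exist(set2, tpl)
--         if existin2 == "No":
--             existin3 = _check_keyword_exist(set3, tpl)
--             if existin3 == "No":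
--                 existin4 = _check_keyword_exist(set4, tpl)
--                 if existin4 == "No":
--                     removed_tuples.append(tpl)
--     return removed_tuples
-- ===== SOURCE B (Python) =====
-- def _loop_check_keyword_exist(set1, set2, set3, set4):
--     # Worklist pruning: iterate over the OTHER sets, repeatedly filtering the
--     # remaining candidates; whatever survives every pruning pass is returned.
--     remaining = list(set1)
--     for other in (set2, set3, set4):
--         for t in other:
--             remaining = [tpl for tpl in remaining if tpl[1] != t[1]]
--     return remaining
-- ===== Notes on version B (the rewrite author's own statement) =====
-- stated objective: alternative
-- what changed: Inverted the iteration: instead of scanning each set1 element against the three other sets, B folds over the concatenation of the other sets, pruning a worklist initialised to set1 with one filter pass per foreign tuple.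
import Mathlib
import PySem

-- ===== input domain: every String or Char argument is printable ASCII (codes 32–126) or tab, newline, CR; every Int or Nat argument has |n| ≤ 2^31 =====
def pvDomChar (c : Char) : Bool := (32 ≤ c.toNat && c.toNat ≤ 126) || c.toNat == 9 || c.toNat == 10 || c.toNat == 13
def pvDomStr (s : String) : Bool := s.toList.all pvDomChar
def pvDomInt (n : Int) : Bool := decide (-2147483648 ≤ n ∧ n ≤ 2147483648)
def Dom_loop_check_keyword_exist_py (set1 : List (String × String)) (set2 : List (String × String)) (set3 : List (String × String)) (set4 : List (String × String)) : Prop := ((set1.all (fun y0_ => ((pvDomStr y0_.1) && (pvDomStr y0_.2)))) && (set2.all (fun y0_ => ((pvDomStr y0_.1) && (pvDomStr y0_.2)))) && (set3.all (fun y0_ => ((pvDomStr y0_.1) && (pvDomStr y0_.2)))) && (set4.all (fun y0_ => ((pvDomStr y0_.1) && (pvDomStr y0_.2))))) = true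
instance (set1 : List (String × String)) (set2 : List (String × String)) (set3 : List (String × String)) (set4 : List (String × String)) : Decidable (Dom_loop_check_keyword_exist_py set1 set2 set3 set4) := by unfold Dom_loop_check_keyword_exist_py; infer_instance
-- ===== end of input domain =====

-- B inverts the iteration: it folds over set2++set3++set4, pruning a worklist initialised to set1
-- (one filter pass per foreign tuple), instead of testing each set1 element against the three sets.
-- ===== PORT A =====
def check_keyword_exist_py (the_set : List (String × String)) (the_tuple : String × String) : String :=
  if the_set ≠ [] then
    the_set.foldl (fun exist tpl => if tpl.2 == the_tuple.2 then "Yes" else exist) "No"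
  else "No"

def loop_check_keyword_exist_py (set1 : List (String × String)) (set2 : List (String × String)) (set3 : List (String × String)) (set4 : List (String × String)) : List (String × String) :=
  set1.foldl (fun removed_tuples tpl =>
    if check_keyword_exist_py set2 tpl = "No" then
      if check_keyword_exist_py set3 tpl = "No" then
        if check_keyword_exist_py set4 tpl = "No" then
          removed_tuples ++ [tpl]
        else removed_tuples
      else removed_tuples
    else removed_tuples) []

-- ===== PORT B =====
def prune_pass (remaining : List (String × String)) (other : List (String × String)) : List (String × String) :=
  other.foldl (fun remaining t => remaining.filter (fun tpl => !(tpl.2 == t.2))) remaining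

def loop_check_keyword_exist_py_alt (set1 : List (String × String)) (set2 : List (String × String)) (set3 : List (String × String)) (set4 : List (String × String)) : List (String × String) :=
  [set2, set3, set4].foldl prune_pass set1

-- ===== PRECONDITION & SPEC =====
def Spec_loop_check_keyword_exist_py (set1 : List (String × String)) (set2 : List (String × String)) (set3 : List (String × String)) (set4 : List (String × String)) (out : List (String × String)) : Prop := out = loop_check_keyword_exist_py_alt set1 set2 set3 set4
instance (set1 : List (String × String)) (set2 : List (String × String)) (set3 : List (String × String)) (set4 : List (String × String)) (out : List (String × String)) : Decidable (Spec_loop_check_keyword_exist_py set1 set2 set3 set4 out) := by unfold Spec_loop_check_keyword_exist_py; infer_instance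

-- ===== CLAIM (what is proved, stated in full; the proofs are below) =====
def Claim_equal_loop_check_keyword_exist_py : Prop := ∀ (set1 : List (String × String)) (set2 : List (String × String)) (set3 : List (String × String)) (set4 : List (String × String)), Dom_loop_check_keyword_exist_py set1 set2 set3 set4 → Spec_loop_check_keyword_exist_py set1 set2 set3 set4 (loop_check_keyword_exist_py set1 set2 set3 set4)

-- ===== LEMMAS AND PROOFS =====

lemma check_foldl (s : List (String × String)) (t : String × String) (acc : String) :
    s.foldl (fun exist tpl => if tpl.2 == t.2 then "Yes" else exist) acc
      = if s.any (fun x => x.2 == t.2) then "Yes" else acc := by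
  induction s generalizing acc with
  | nil => simp
  | cons x xs ih =>
    rw [List.foldl_cons, ih]
    by_cases h : (x.2 == t.2) = true
    · simp [List.any_cons, h]
    · rw [Bool.not_eq_true] at h
      simp only [List.any_cons, h, Bool.false_or]
      simp

lemma check_eq_no_iff (s : List (String × String)) (t : String × String) :
    (check_keyword_exist_py s t = "No") ↔ (s.any (fun x => x.2 == t.2)) = false := by
  unfold check_keyword_exist_py
  by_cases hs : s = []
  · simp [hs]
  · rw [if_pos hs, check_foldl]
    by_cases h : s.any (fun x => x.2 == t.2) = true
    · simp only [h, if_true]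
      constructor
      · intro hc; exact absurd hc (by decide)
      · intro hf; exact absurd hf (by decide)
    · simp only [Bool.not_eq_true] at h
      simp [h]

-- B's fold prunes set1 down to exactly the elements whose key matches nothing in `others`.
lemma prune_foldl (others xs : List (String × String)) :
    others.foldl (fun remaining t => remaining.filter (fun tpl => !(tpl.2 == t.2))) xs
      = xs.filter (fun tpl => !(others.any (fun t => tpl.2 == t.2))) := by
  induction others generalizing xs with
  | nil => simp
  | cons t ts ih =>
    rw [List.foldl_cons, ih, List.filter_filter]
    apply List.filter_congr
    intro x _
    simp only [List.any_cons, Bool.not_or, Bool.and_comm]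

-- the "No" test, as a Bool.
lemma check_decide (s : List (String × String)) (t : String × String) :
    decide (check_keyword_exist_py s t = "No") = !(s.any fun x => x.2 == t.2) := by
  cases hA : s.any (fun x => x.2 == t.2) with
  | false => have := (check_eq_no_iff s t).mpr hA; simp [this]
  | true =>
    have : ¬ check_keyword_exist_py s t = "No" := by
      intro hc; rw [check_eq_no_iff] at hc; rw [hc] at hA; cases hA
    simp [this]

-- A's fold is the filter of set1 by the three "No" tests.
lemma a_eq_filter (s1 s2 s3 s4 : List (String × String)) :
    loop_check_keyword_exist_py s1 s2 s3 s4
      = s1.filter (fun tpl => decide (check_keyword_exist_py s2 tpl = "No" ∧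
          check_keyword_exist_py s3 tpl = "No" ∧ check_keyword_exist_py s4 tpl = "No")) := by
  unfold loop_check_keyword_exist_py
  have : ∀ (xs : List (String × String)) (acc : List (String × String)),
      xs.foldl (fun removed_tuples tpl =>
        if check_keyword_exist_py s2 tpl = "No" then
          if check_keyword_exist_py s3 tpl = "No" then
            if check_keyword_exist_py s4 tpl = "No" then removed_tuples ++ [tpl]
            else removed_tuples
          else removed_tuples
        else removed_tuples) acc
      = acc ++ xs.filter (fun tpl => decide (check_keyword_exist_py s2 tpl = "No" ∧
          check_keyword_exist_py s3 tpl = "No" ∧ check_keyword_exist_py s4 tpl = "No")) := by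
    intro xs
    induction xs with
    | nil => simp
    | cons x xs ih =>
      intro acc
      rw [List.foldl_cons]
      by_cases h2 : check_keyword_exist_py s2 x = "No" <;>
        by_cases h3 : check_keyword_exist_py s3 x = "No" <;>
          by_cases h4 : check_keyword_exist_py s4 x = "No" <;>
            simp [h2, h3, h4, ih, List.append_assoc]
  rw [this, List.nil_append]

-- ===== VERDICT (by name: the statement is the Claim_ definition above) =====
theorem loop_check_keyword_exist_py_spec : Claim_equal_loop_check_keyword_exist_py := by
  intro s1 s2 s3 s4 _
  unfold Spec_loop_check_keyword_exist_py loop_check_keyword_exist_py_alt prune_pass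
  simp only [List.foldl_cons, List.foldl_nil]
  rw [← List.foldl_append, ← List.foldl_append, a_eq_filter, prune_foldl]
  apply List.filter_congr
  intro tpl _
  rw [Bool.decide_and, Bool.decide_and, check_decide, check_decide, check_decide]
  have hswap : ∀ (s : List (String × String)),
      (s.any fun x => x.2 == tpl.2) = (s.any fun t => tpl.2 == t.2) := by
    intro s
    induction s with
    | nil => rfl
    | cons x xs ih => simp only [List.any_cons, BEq.comm]
  simp only [List.any_append, Bool.not_or, Bool.and_assoc, hswap]
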